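-- pv_equiv track=rewrite | github.com/vicramgonus/punctuator2tf2-vicramgon | process_text.py | tokenize2
-- ===== SOURCE A (Python) =====
-- def tokenize2(sent, puncts={".": ".PERIOD", ",": ",COMMA", ";": ";SEMICOLON",
--         ":": ":COLON", "?": "?QUESTIONMARK", "!": "!EXCLAMATIONMARK"}):
--   """
--     Corresponde a la función de tokenización de frases con respecto a un conjunto
--     de símbolos de puntuación, considera además los espacios como tokens
--
--     Parámetros
--     ----------
--     sent : str
--         La frase de entrada para la tokenización
--
--     puncts : dict(str, str), optional
--         Un diccionario con los símbolos originales y los respectivos tokens. El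
--         valor por defecto es {".": ".PERIOD", ",": ",COMMA", ";": ";SEMICOLON",
--         ":": ":COLON", "?": "?QUESTIONMARK", "!": "!EXCLAMATIONMARK"}
--
--     Salida
--     ------
--     list(str)
--         La lista de tokens asociado.
--
--   """
--
--   # Inicializamos una lista vacía que contendrá, en cada paso, los tokens
--   # completos procesados hasta el momento.
--   res = []
--
--   # Se inicializa una cadena vacía que contendrá, en cada paso, la secuencia
--   # parcial de caractéres de la cadena del token en procesamiento.
--   partial = ''
--
--   # Reading type
--   cur_read_type = None
--
--   # En cada paso (hasta terminar de procesar todos los caracteres de la cadena)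
--   for i in range(len(sent)):
--
--     # Se lee el carácter i-ésimo de la cadena
--     c_i = sent[i]
--
--     # Si dicho carácter corresponde a un espacio o a un signo de puntuación
--     # entonces, el token que estábamos procesando finaliza, luego
--     if c_i == ' ' or c_i in puncts:
--
--       # Ha de añadirse (junto al signo de corte), como nuevos tokens.
--       # Sólo se añadirá no es vacío ( si no corresponde al espacio, resp.).
--       if partial:
--         res.append(partial)
--
--       res.append(puncts[c_i] if c_i != ' ' else c_i)
--
--       # Y reseteamos la cadena parcial de token a vacío
--       partial = ''
--       cur_read_type = None
--
--     # En otro caso,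
--     else:
--       # Añadimos el carácter a la cadena parcial del token procesamiento
--       # si los tipos no coinciden entendemos que corresponden a cadenas distintas
--       # Y por ende, partimos guardamos el token anterior e inicializamos uno nuevo
--       # con el carácter leído y su tipo
--       if (c_i.isdigit()):
--           if(cur_read_type == 'string'):
--             res += [partial]
--             partial = ''
--
--           cur_read_type = 'number'
--
--       else:
--           if(cur_read_type == 'number'):
--             res += [partial]
--             partial = ''
--
--           cur_read_type = 'string'
--
--
--       partial += c_i
--
--     #Se continúa el procesamiento del siguiente carácter.
--
--   # El token leído en última instancia es añadido a la lista de tokens (siempre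
--   # que no sea vacío)
--   res += [partial] if partial.strip() != '' else []
--
--   # Finalmente, se devuelve la lista de tokens
--   return res
-- ===== SOURCE B (Python) =====
-- def tokenize2(sent, puncts={".": ".PERIOD", ",": ",COMMA", ";": ";SEMICOLON",
--         ":": ":COLON", "?": "?QUESTIONMARK", "!": "!EXCLAMATIONMARK"}):
--   # Maximal-munch scanner: emit one token per maximal run instead of growing a
--   # character buffer with type-state; only the last emitted run may be dropped
--   # (when it is whitespace-only).
--   res = []
--   last_is_run = False
--   i, n = 0, len(sent)
--   while i < n:
--     c = sent[i]
--     if c == ' ' or c in puncts: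
--       res.append(puncts[c] if c != ' ' else c)
--       last_is_run = False
--       i += 1
--     else:
--       digit = c.isdigit()
--       j = i + 1
--       while j < n and sent[j] != ' ' and sent[j] not in puncts and sent[j].isdigit() == digit:
--         j += 1
--       res.append(sent[i:j])
--       last_is_run = True
--       i = j
--   if last_is_run and not res[-1].strip():
--     res.pop()
--   return res
-- ===== Notes on version B (the rewrite author's own statement) =====
-- stated objective: alternative
-- what changed: A grows a character buffer with a digit/string type-state and flushes it on every class change; B is a maximal-munch scanner that slices each maximal run out of the string in one inner loop, tags whether the last token was a run, and drops a trailing whitespace-only run token at the end.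
import Mathlib
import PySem

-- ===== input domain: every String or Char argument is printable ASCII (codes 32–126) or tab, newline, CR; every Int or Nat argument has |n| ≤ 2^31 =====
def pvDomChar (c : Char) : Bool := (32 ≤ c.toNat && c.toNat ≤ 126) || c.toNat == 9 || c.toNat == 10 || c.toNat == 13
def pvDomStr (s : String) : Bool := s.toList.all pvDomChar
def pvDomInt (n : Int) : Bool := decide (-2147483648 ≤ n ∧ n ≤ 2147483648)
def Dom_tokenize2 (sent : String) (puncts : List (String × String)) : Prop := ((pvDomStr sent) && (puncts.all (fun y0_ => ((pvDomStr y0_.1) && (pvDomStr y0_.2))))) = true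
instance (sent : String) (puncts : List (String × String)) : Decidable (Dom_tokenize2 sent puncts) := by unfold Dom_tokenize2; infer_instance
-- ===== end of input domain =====

-- B replaces A's character-by-character buffer/type-state automaton with a
-- maximal-munch scanner that emits one token per maximal run (objective:
-- alternative — same single pass, different token-building strategy).

-- ===== PORT A =====
-- A's for-loop over sent with state (res, buf, cur_read_type);
-- cur_read_type: none = None, some true = 'number', some false = 'string'.
-- The `.getD (String.ofList [c])` default is unreachable: in that branch c ≠ ' '
-- and c is a key of puncts, exactly where Python's `puncts[c_i]` succeeds.
def tokenize2Loop (d : PySem.Dict String String) :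
    List Char → List String → List Char → Option Bool → List String
  | [], res, buf, _ =>
      -- res += [buf] if buf.strip() != '' else []
      res ++ (if PySem.Chars.strip buf ≠ [] then [String.ofList buf] else [])
  | c :: cs, res, buf, ty =>
      if c = ' ' ∨ d.contains (String.ofList [c]) = true then
        tokenize2Loop d cs
          ((if buf ≠ [] then res ++ [String.ofList buf] else res) ++
            [if c ≠ ' ' then (d.get? (String.ofList [c])).getD (String.ofList [c])
             else String.ofList [c]])
          [] none
      else if PySem.Chars.isdigit c then
        if ty = some false then tokenize2Loop d cs (res ++ [String.ofList buf]) [c] (some true)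
        else tokenize2Loop d cs res (buf ++ [c]) (some true)
      else
        if ty = some true then tokenize2Loop d cs (res ++ [String.ofList buf]) [c] (some false)
        else tokenize2Loop d cs res (buf ++ [c]) (some false)

def tokenize2 (sent : String) (puncts : List (String × String)) : List String :=
  tokenize2Loop (PySem.Dict.mk puncts) sent.toList [] [] none

-- ===== PORT B =====
-- B's inner while loop: take the maximal run of characters that are not ' ',
-- not punctuation keys, and whose isdigit() agrees with the run's first char.
def runSpan (d : PySem.Dict String String) (digit : Bool) :
    List Char → List Char × List Char
  | [] => ([], [])
  | c :: cs =>
      if c ≠ ' ' ∧ d.contains (String.ofList [c]) = false ∧ PySem.Chars.isdigit c = digit then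
        let p := runSpan d digit cs
        (c :: p.1, p.2)
      else ([], c :: cs)

theorem runSpan_rest_length (d : PySem.Dict String String) (digit : Bool) :
    ∀ cs : List Char, (runSpan d digit cs).2.length ≤ cs.length := by
  intro cs
  induction cs with
  | nil => simp [runSpan]
  | cons c cs ih =>
      simp only [runSpan]
      split
      · simpa using Nat.le_succ_of_le ih
      · simp

-- B's outer while loop over positions; state (res, last_is_run).
def tokenize2AltLoop (d : PySem.Dict String String) :
    List Char → List String → Bool → List String × Bool
  | [], res, last => (res, last)
  | c :: cs, res, _ =>
      if c = ' ' ∨ d.contains (String.ofList [c]) = true then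
        tokenize2AltLoop d cs
          (res ++ [if c ≠ ' ' then (d.get? (String.ofList [c])).getD (String.ofList [c])
                   else String.ofList [c]])
          false
      else
        let p := runSpan d (PySem.Chars.isdigit c) cs
        tokenize2AltLoop d p.2 (res ++ [String.ofList (c :: p.1)]) true
  termination_by cs => cs.length
  decreasing_by
    · simp
    · exact Nat.lt_succ_of_le (runSpan_rest_length d (PySem.Chars.isdigit c) cs)

-- the trailing `if last_is_run and not res[-1].strip(): res.pop()`
-- (`.getLastD ""` is unreachable with an empty res: last_is_run = true only
-- after at least one append).
def dropTrailingWs (pr : List String × Bool) : List String :=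
  if pr.2 = true ∧ PySem.Chars.strip (pr.1.getLastD "").toList = [] then pr.1.dropLast else pr.1

def tokenize2_alt (sent : String) (puncts : List (String × String)) : List String :=
  dropTrailingWs (tokenize2AltLoop (PySem.Dict.mk puncts) sent.toList [] false)

-- ===== PRECONDITION & SPEC =====
def Spec_tokenize2 (sent : String) (puncts : List (String × String)) (out : List String) : Prop := out = tokenize2_alt sent puncts
instance (sent : String) (puncts : List (String × String)) (out : List String) : Decidable (Spec_tokenize2 sent puncts out) := by unfold Spec_tokenize2; infer_instance

-- ===== CLAIM (what is proved, stated in full; the proofs are below) =====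
def Claim_equal_tokenize2 : Prop := ∀ (sent : String) (puncts : List (String × String)), Dom_tokenize2 sent puncts → Spec_tokenize2 sent puncts (tokenize2 sent puncts)

-- ===== LEMMAS AND PROOFS =====

theorem altLoop_acc_aux (d : PySem.Dict String String) :
    ∀ (n : ℕ) (cs : List Char), cs.length ≤ n → ∀ (acc : List String) (l : Bool),
      tokenize2AltLoop d cs acc l =
        (acc ++ (tokenize2AltLoop d cs [] l).1, (tokenize2AltLoop d cs [] l).2) := by
  intro n
  induction n with
  | zero =>
      intro cs hcs acc l
      rw [List.length_eq_zero_iff.mp (Nat.le_zero.mp hcs)]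
      simp [tokenize2AltLoop]
  | succ n ih =>
      intro cs hcs acc l
      match cs with
      | [] => simp [tokenize2AltLoop]
      | c :: cs =>
          simp only [tokenize2AltLoop]
          simp only [List.nil_append]
          split
          · rw [ih cs (by simpa using hcs) (acc ++ _) false,
                ih cs (by simpa using hcs) [_] false]
            simp
          · rw [ih _ (Nat.le_of_lt_succ (Nat.lt_of_le_of_lt (runSpan_rest_length d _ cs) (by simpa using hcs))) (acc ++ _) true,
                ih _ (Nat.le_of_lt_succ (Nat.lt_of_le_of_lt (runSpan_rest_length d _ cs) (by simpa using hcs))) [_] true]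
            simp

theorem altLoop_acc' (d : PySem.Dict String String) (cs : List Char) (acc : List String) (l : Bool) :
      tokenize2AltLoop d cs acc l =
        (acc ++ (tokenize2AltLoop d cs [] l).1, (tokenize2AltLoop d cs [] l).2) :=
  altLoop_acc_aux d cs.length cs le_rfl acc l

theorem altLoop_flag' (d : PySem.Dict String String) (cs : List Char) (l : Bool)
    (h : (tokenize2AltLoop d cs [] l).1 = []) : (tokenize2AltLoop d cs [] l).2 = l := by
  match cs with
  | [] => simp [tokenize2AltLoop]
  | c :: cs =>
      exfalso
      revert h
      simp only [tokenize2AltLoop]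
      split
      · rw [altLoop_acc' d cs _ false]; simp
      · rw [altLoop_acc' d _ _ true]; simp

theorem dropTrailingWs_cons' (x : String) (ys : List String) (l : Bool)
    (h : l = true → ys ≠ []) :
    dropTrailingWs (x :: ys, l) = x :: dropTrailingWs (ys, l) := by
  match l with
  | false => simp [dropTrailingWs]
  | true =>
      match ys with
      | [] => exact absurd rfl (h rfl)
      | y :: ys => simp [dropTrailingWs]; split <;> simp

theorem runSpan_spec' (d : PySem.Dict String String) (b : Bool) (cs : List Char) :
    cs = (runSpan d b cs).1 ++ (runSpan d b cs).2 ∧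
    (∀ c ∈ (runSpan d b cs).1,
      c ≠ ' ' ∧ d.contains (String.ofList [c]) = false ∧ PySem.Chars.isdigit c = b) ∧
    ((runSpan d b cs).2 = [] ∨ ∃ c cs', (runSpan d b cs).2 = c :: cs' ∧
      ¬(c ≠ ' ' ∧ d.contains (String.ofList [c]) = false ∧ PySem.Chars.isdigit c = b)) := by
  induction cs with
  | nil => simp [runSpan]
  | cons c cs ih =>
      simp only [runSpan]
      split
      · refine ⟨by simpa using ih.1, ?_, by simpa using ih.2.2⟩
        intro x hx
        rcases List.mem_cons.mp hx with h | h
        · subst h; assumption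
        · exact ih.2.1 x h
      · exact ⟨rfl, by simp, Or.inr ⟨c, cs, rfl, by assumption⟩⟩

theorem loopA_run' (d : PySem.Dict String String) (b : Bool) :
    ∀ (run rest : List Char) (res : List String) (buf : List Char),
      (∀ c ∈ run, c ≠ ' ' ∧ d.contains (String.ofList [c]) = false ∧ PySem.Chars.isdigit c = b) →
      tokenize2Loop d (run ++ rest) res buf (some b) =
        tokenize2Loop d rest res (buf ++ run) (some b) := by
  intro run
  induction run with
  | nil => simp
  | cons c run ih =>
      intro rest res buf h
      obtain ⟨hsp, hct, hdg⟩ := h c (by simp)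
      simp only [List.cons_append, tokenize2Loop, hct]
      rw [if_neg (by simp [hsp])]  -- c is neither ' ' nor a key
      match b with
      | true =>
          rw [if_pos hdg, if_neg (by simp)]
          rw [ih rest res (buf ++ [c]) (fun x hx => h x (by simp [hx]))]
          simp
      | false =>
          rw [if_neg (by simp [hdg]), if_neg (by simp)]
          rw [ih rest res (buf ++ [c]) (fun x hx => h x (by simp [hx]))]
          simp


theorem stripNil : PySem.Chars.strip ([] : List Char) = [] := by decide

theorem mainSim' (d : PySem.Dict String String) :
    ∀ (n : ℕ) (cs : List Char), cs.length ≤ n →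
      (∀ res : List String,
        tokenize2Loop d cs res [] none =
          res ++ dropTrailingWs (tokenize2AltLoop d cs [] false)) ∧
      (∀ (res : List String) (buf : List Char) (b : Bool), buf ≠ [] →
        tokenize2Loop d cs res buf (some b) =
          res ++ dropTrailingWs
            (String.ofList (buf ++ (runSpan d b cs).1) ::
              (tokenize2AltLoop d (runSpan d b cs).2 [] true).1,
             (tokenize2AltLoop d (runSpan d b cs).2 [] true).2)) := by
  intro n
  induction n with
  | zero =>
      intro cs hcs
      rw [List.length_eq_zero_iff.mp (Nat.le_zero.mp hcs)]
      constructor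
      · intro res
        simp [tokenize2Loop, tokenize2AltLoop, dropTrailingWs, stripNil]
      · intro res buf b hbuf
        simp only [tokenize2Loop, tokenize2AltLoop, runSpan, dropTrailingWs]
        by_cases hs : PySem.Chars.strip buf = []
        · simp [hs]
        · simp [hs]
  | succ n ih =>
      intro cs hcs
      constructor
      · -- M1 : idle state
        intro res
        match cs with
        | [] => simp [tokenize2Loop, tokenize2AltLoop, dropTrailingWs, stripNil]
        | c :: cs =>
            have hlen : cs.length ≤ n := by simpa using hcs
            simp only [tokenize2Loop, List.nil_append]
            split
            · -- separator: flush nothing, emit the punct/space token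
              rw [if_neg (by simp)]
              rw [(ih cs hlen).1]
              conv_rhs => rw [show tokenize2AltLoop d (c :: cs) [] false =
                tokenize2AltLoop d cs [if c ≠ ' ' then (d.get? (String.ofList [c])).getD (String.ofList [c]) else String.ofList [c]] false from by
                  simp only [tokenize2AltLoop, List.nil_append]; rw [if_pos (by assumption)]]
              rw [altLoop_acc' d cs [if c ≠ ' ' then (d.get? (String.ofList [c])).getD (String.ofList [c]) else String.ofList [c]] false]
              simp only [List.singleton_append]
              rw [dropTrailingWs_cons' _ _ _ (fun hl he => by
                have := altLoop_flag' d cs false he; rw [this] at hl; exact Bool.false_ne_true hl)]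
              simp
            · -- run character: start a pending run [c]
              have hstep : tokenize2AltLoop d (c :: cs) [] false =
                  (String.ofList (c :: (runSpan d (PySem.Chars.isdigit c) cs).1) ::
                    (tokenize2AltLoop d (runSpan d (PySem.Chars.isdigit c) cs).2 [] true).1,
                   (tokenize2AltLoop d (runSpan d (PySem.Chars.isdigit c) cs).2 [] true).2) := by
                simp only [tokenize2AltLoop, List.nil_append]
                rw [if_neg (by assumption)]
                rw [altLoop_acc' d (runSpan d (PySem.Chars.isdigit c) cs).2 [String.ofList (c :: (runSpan d (PySem.Chars.isdigit c) cs).1)] true]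
                simp
              by_cases hb : PySem.Chars.isdigit c = true
              · rw [if_pos hb, if_neg (by simp)]
                rw [(ih cs hlen).2 res [c] true (by simp)]
                rw [hstep, hb]
                simp
              · have hb' : PySem.Chars.isdigit c = false := by simpa using hb
                rw [if_neg hb, if_neg (by simp)]
                rw [(ih cs hlen).2 res [c] false (by simp)]
                rw [hstep, hb']
                simp
      · -- M2 : pending partial buf of class b
        intro res buf b hbuf
        obtain ⟨hsplit, hrun, hrest⟩ := runSpan_spec' d b cs
        conv_lhs => rw [hsplit]
        rw [loopA_run' d b _ _ res buf hrun]
        rcases hrest with hre | ⟨c, ds, hre, hnp⟩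
        · rw [hre]
          simp only [tokenize2Loop, tokenize2AltLoop, dropTrailingWs]
          by_cases hs : PySem.Chars.strip (buf ++ (runSpan d b cs).1) = []
          · simp [hs]
          · simp [hs]
        · have hds : ds.length ≤ n := by
            have hl := congrArg List.length hsplit
            rw [hre] at hl
            simp at hl
            omega
          rw [hre]
          by_cases hsep : c = ' ' ∨ d.contains (String.ofList [c]) = true
          · -- run ends at a separator
            simp only [tokenize2Loop]
            rw [if_pos hsep, if_pos (fun h => hbuf (List.append_eq_nil_iff.mp h).1)]
            rw [(ih ds hds).1]
            have hstep : tokenize2AltLoop d (c :: ds) [] true =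
                ((if c ≠ ' ' then (d.get? (String.ofList [c])).getD (String.ofList [c]) else String.ofList [c]) :: (tokenize2AltLoop d ds [] false).1,
                 (tokenize2AltLoop d ds [] false).2) := by
              simp only [tokenize2AltLoop, List.nil_append]
              rw [if_pos hsep,
                altLoop_acc' d ds [if c ≠ ' ' then (d.get? (String.ofList [c])).getD (String.ofList [c]) else String.ofList [c]] false]
              simp
            rw [hstep]
            rw [dropTrailingWs_cons' _ _ _ (fun _ => by simp)]
            rw [dropTrailingWs_cons' _ _ _ (fun hl he => by
              have := altLoop_flag' d ds false he; rw [this] at hl; exact Bool.false_ne_true hl)]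
            simp
          · -- run ends at a character of the other class
            have hc : ¬ c = ' ' ∧ d.contains (String.ofList [c]) = false := by
              constructor
              · intro h; exact hsep (Or.inl h)
              · cases hcon : d.contains (String.ofList [c])
                · rfl
                · exact absurd (Or.inr hcon) hsep
            have hdig : PySem.Chars.isdigit c = !b := by
              cases hv : PySem.Chars.isdigit c
              · cases b
                · exact absurd ⟨hc.1, hc.2, hv⟩ hnp
                · rfl
              · cases b
                · rfl
                · exact absurd ⟨hc.1, hc.2, hv⟩ hnp
            have hstep : tokenize2AltLoop d (c :: ds) [] true =
                (String.ofList (c :: (runSpan d (!b) ds).1) ::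
                  (tokenize2AltLoop d (runSpan d (!b) ds).2 [] true).1,
                 (tokenize2AltLoop d (runSpan d (!b) ds).2 [] true).2) := by
              simp only [tokenize2AltLoop, List.nil_append]
              rw [if_neg hsep, hdig,
                altLoop_acc' d (runSpan d (!b) ds).2 [String.ofList (c :: (runSpan d (!b) ds).1)] true]
              simp
            have hA : tokenize2Loop d (c :: ds) res (buf ++ (runSpan d b cs).1) (some b) =
                tokenize2Loop d ds (res ++ [String.ofList (buf ++ (runSpan d b cs).1)]) [c] (some (!b)) := by
              simp only [tokenize2Loop]
              rw [if_neg hsep]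
              cases b
              · rw [if_pos (by simpa using hdig), if_pos rfl]
                rfl
              · rw [if_neg (by simp [hdig]), if_pos rfl]
                rfl
            rw [hA]
            rw [(ih ds hds).2 _ [c] (!b) (by simp)]
            have hfin : dropTrailingWs
                (String.ofList (buf ++ (runSpan d b cs).1) :: (tokenize2AltLoop d (c :: ds) [] true).1,
                 (tokenize2AltLoop d (c :: ds) [] true).2)
              = String.ofList (buf ++ (runSpan d b cs).1) ::
                  dropTrailingWs (tokenize2AltLoop d (c :: ds) [] true) := by
              rw [hstep]
              exact dropTrailingWs_cons' _ _ _ (fun _ => by simp)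
            rw [hfin, hstep]
            simp

-- ===== VERDICT (by name: the statement is the Claim_ definition above) =====
theorem tokenize2_spec : Claim_equal_tokenize2 := by
  intro sent puncts _
  unfold Spec_tokenize2 tokenize2 tokenize2_alt
  simpa using (mainSim' (PySem.Dict.mk puncts) sent.toList.length sent.toList le_rfl).1 []
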